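-- pv_equiv track=rewrite | github.com/HarrisFelix/ad-fiddle | src/code/dns.py | _is_ldap_dns
-- ===== SOURCE A (Python) =====
-- def _is_ldap_dns(dns: str) -> bool:
--     """Checks if the DNS is in standard or LDAP mode.
--
--     Standard would be 'mynetwork.com' | LDAP mode would be 'dc=mynetwork,dc=com'.
--
--     Args:
--         dns: The DNS to check if it's in LDAP mode.
--
--     Returns:
--         Whether the DNS is in LDAP mode (True) or not (False).
--     """
--     if dns:
--         dns = dns.split(',')
--
--         for e in dns:
--             if not e[:3] == 'dc=':
--                 return False
--         return True
--     else:
--         return False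
-- ===== SOURCE B (Python) =====
-- def _is_ldap_dns(dns: str) -> bool:
--     """Single-pass DFA over the characters: no split, no intermediate list.
--
--     state 0..2 = how many chars of the required 'dc=' prefix of the current
--     segment have been seen; state 3 = inside the segment body.
--     """
--     if not dns:
--         return False
--     state = 0
--     for ch in dns:
--         if ch == ',':
--             if state != 3:
--                 return False
--             state = 0
--         elif state < 3:
--             if ch != 'dc='[state]:
--                 return False
--             state += 1
--     return state == 3
-- ===== Notes on version B (the rewrite author's own statement) =====
-- stated objective: alternative
-- what changed: Replaced A's split-on-comma-then-check-each-segment with a single left-to-right pass driven by a 4-state DFA (chars of the required prefix seen so far / segment body), so no intermediate list of segments is built.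
import Mathlib
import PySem

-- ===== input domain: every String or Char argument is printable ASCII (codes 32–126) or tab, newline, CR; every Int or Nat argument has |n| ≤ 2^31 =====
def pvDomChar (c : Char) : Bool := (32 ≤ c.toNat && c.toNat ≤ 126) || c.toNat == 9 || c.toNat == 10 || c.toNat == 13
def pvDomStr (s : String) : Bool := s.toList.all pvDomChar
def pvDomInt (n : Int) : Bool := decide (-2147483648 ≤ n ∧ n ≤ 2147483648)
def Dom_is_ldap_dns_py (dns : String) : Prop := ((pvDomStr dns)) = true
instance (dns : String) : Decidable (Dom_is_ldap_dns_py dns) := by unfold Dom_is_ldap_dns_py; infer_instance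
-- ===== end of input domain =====

-- B replaces A's split-into-segments-then-check-each with a single-pass 4-state DFA
-- over the characters (no intermediate list); objective: alternative/idiomatic.

-- ===== PORT A =====
-- the `for e in dns: if not e[:3] == 'dc=': return False / return True` loop
def pvA_loop : List (List Char) → Bool
  | [] => true
  | e :: rest =>
      if ¬ (PySem.Chars.slice e none (some 3) = ['d', 'c', '=']) then false
      else pvA_loop rest

def is_ldap_dns_py (dns : String) : Bool :=
  if dns ≠ "" then
    pvA_loop (PySem.Chars.splitOn dns.toList [','])
  else false

-- ===== PORT B =====
-- the constant string 'dc=' indexed by the state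
def pvB_dc : List Char := ['d', 'c', '=']

-- the `for ch in dns` DFA loop of Source B; state 0..2 = chars of 'dc=' seen, 3 = body
def pvB_loop : Nat → List Char → Bool
  | state, [] => state == 3
  | state, ch :: rest =>
      if ch = ',' then
        if state ≠ 3 then false else pvB_loop 0 rest
      else if state < 3 then
        -- 'dc='[state]: state < 3 here, so the index is always in range
        if ch ≠ pvB_dc.getD state ' ' then false else pvB_loop (state + 1) rest
      else pvB_loop state rest

def is_ldap_dns_py_alt (dns : String) : Bool :=
  if dns = "" then false else pvB_loop 0 dns.toList

-- ===== PRECONDITION & SPEC =====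
def Spec_is_ldap_dns_py (dns : String) (out : Bool) : Prop := out = is_ldap_dns_py_alt dns
instance (dns : String) (out : Bool) : Decidable (Spec_is_ldap_dns_py dns out) := by unfold Spec_is_ldap_dns_py; infer_instance

-- ===== CLAIM (what is proved, stated in full; the proofs are below) =====
def Claim_equal_is_ldap_dns_py : Prop := ∀ (dns : String), Dom_is_ldap_dns_py dns → Spec_is_ldap_dns_py dns (is_ldap_dns_py dns)

-- ===== LEMMAS AND PROOFS =====

/-- Reference splitter: split a char list on ','. -/
def pvSplit : List Char → List (List Char)
  | [] => [[]]
  | c :: rest =>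
      if c = ',' then [] :: pvSplit rest
      else
        match pvSplit rest with
        | h :: t => (c :: h) :: t
        | [] => [[c]]

theorem pvSplit_ne_nil (cs : List Char) : pvSplit cs ≠ [] := by
  cases cs with
  | nil => simp [pvSplit]
  | cons c rest =>
    simp only [pvSplit]
    split
    · simp
    · cases hh : pvSplit rest <;> simp

theorem pvSplitOn_go_eq (fuel : Nat) (l cur : List Char) (acc : List (List Char))
    (hf : l.length < fuel) :
    PySem.Chars.splitOn.go [','] fuel l cur acc =
      acc.reverse ++
        (match pvSplit l with
         | h :: t => (cur.reverse ++ h) :: t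
         | [] => [cur.reverse]) := by
  induction fuel generalizing l cur acc with
  | zero => omega
  | succ fuel ih =>
    cases l with
    | nil =>
      simp [PySem.Chars.splitOn.go, pvSplit]
    | cons c rest =>
      by_cases hc : c = ','
      · subst hc
        have hpre : List.isPrefixOf [','] (',' :: rest) = true := by
          simp [List.isPrefixOf]
        rw [PySem.Chars.splitOn.go]
        simp only [hpre, if_pos, List.length_cons, List.length_nil, List.drop_succ_cons,
          List.drop_zero]
        rw [ih rest [] (cur.reverse :: acc) (by simpa using Nat.lt_of_succ_lt_succ (by simpa using hf))]
        cases hh : pvSplit rest with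
        | nil => exact absurd hh (pvSplit_ne_nil rest)
        | cons h t =>
          simp [pvSplit, hh]
      · have hpre : List.isPrefixOf [','] (c :: rest) = false := by
          simp [List.isPrefixOf]
          exact fun h => absurd h.symm hc
        rw [PySem.Chars.splitOn.go]
        simp only [hpre, Bool.false_eq_true, if_false]
        rw [ih rest (c :: cur) acc (by simpa using Nat.lt_of_succ_lt_succ (by simpa using hf))]
        cases hh : pvSplit rest with
        | nil => exact absurd hh (pvSplit_ne_nil rest)
        | cons h t =>
          simp [pvSplit, hh, hc]

theorem pvSplitOn_eq (cs : List Char) :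
    PySem.Chars.splitOn cs [','] = pvSplit cs := by
  unfold PySem.Chars.splitOn
  rw [pvSplitOn_go_eq cs.length.succ cs [] [] (Nat.lt_succ_self _)]
  cases hh : pvSplit cs with
  | nil => exact absurd hh (pvSplit_ne_nil cs)
  | cons h t => simp

/-- `e[:3] == 'dc='` is the prefix test. -/
theorem pvCheck_eq (h : List Char) :
    (PySem.Chars.slice h none (some 3) = ['d', 'c', '=']) ↔ (pvB_dc.isPrefixOf h = true) := by
  have hs : PySem.Chars.slice h none (some 3) = h.take 3 := by
    simpa using PySem.List.slice_to_natCast h 3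
  rw [hs]
  match h with
  | [] => simp [pvB_dc]
  | [a] => simp [pvB_dc, List.isPrefixOf]
  | [a, b] => simp [pvB_dc, List.isPrefixOf]
  | a :: b :: c :: t =>
    simp [pvB_dc, List.isPrefixOf, List.take]
    constructor <;> rintro ⟨h1, h2, h3⟩ <;> exact ⟨h1.symm, h2.symm, h3.symm⟩

theorem pvA_loop_eq (l : List (List Char)) :
    pvA_loop l = l.all (fun h => pvB_dc.isPrefixOf h) := by
  induction l with
  | nil => simp [pvA_loop]
  | cons e rest ih =>
    simp only [pvA_loop, List.all_cons, ih]
    by_cases hb : pvB_dc.isPrefixOf e = true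
    · rw [if_neg (not_not_intro ((pvCheck_eq e).mpr hb))]
      simp [hb]
    · rw [if_pos (fun hcc => hb ((pvCheck_eq e).mp hcc))]
      simp at hb
      simp [hb]

/-- DFA invariant: from state `k ≤ 3`, the loop accepts iff the remaining required
prefix `drop k 'dc='` opens the current segment and every later segment has prefix 'dc='. -/
theorem pvB_loop_eq (cs : List Char) : ∀ k, k ≤ 3 →
    pvB_loop k cs =
      ((pvB_dc.drop k).isPrefixOf ((pvSplit cs).headI) && ((pvSplit cs).tail).all (fun h => pvB_dc.isPrefixOf h)) := by
  induction cs with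
  | nil =>
    intro k hk
    interval_cases k <;> simp [pvB_loop, pvSplit, pvB_dc]
  | cons c rest ih =>
    intro k hk
    by_cases hc : c = ','
    · subst hc
      by_cases h3 : k = 3
      · subst h3
        have hstep : pvB_loop 3 (',' :: rest) = pvB_loop 0 rest := by
          simp [pvB_loop]
        rw [hstep, ih 0 (by omega)]
        simp only [pvSplit]
        cases hh : pvSplit rest with
        | nil => exact absurd hh (pvSplit_ne_nil rest)
        | cons h t => simp [pvB_dc, List.headI]
      · have : pvB_loop k (',' :: rest) = false := by
          simp [pvB_loop, h3]
        rw [this]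
        simp only [pvSplit, List.headI]
        have : (pvB_dc.drop k).isPrefixOf ([] : List Char) = false := by
          interval_cases k <;> simp_all [pvB_dc]
        simp [this]
    · have hsplit : pvSplit (c :: rest) =
          match pvSplit rest with
          | h :: t => (c :: h) :: t
          | [] => [[c]] := by
        simp [pvSplit, hc]
      cases hh : pvSplit rest with
      | nil => exact absurd hh (pvSplit_ne_nil rest)
      | cons h t =>
        rw [hsplit, hh]
        by_cases h3 : k = 3
        · subst h3
          have : pvB_loop 3 (c :: rest) = pvB_loop 3 rest := by
            simp [pvB_loop, hc]
          rw [this, ih 3 (by omega), hh]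
          simp [pvB_dc]
        · have hk3 : k < 3 := by omega
          have hdrop : pvB_dc.drop k = pvB_dc.getD k ' ' :: pvB_dc.drop (k + 1) := by
            interval_cases k <;> simp [pvB_dc]
          by_cases hd : c = pvB_dc.getD k ' '
          · have hstep : pvB_loop k (c :: rest) = pvB_loop (k + 1) rest := by
              simp only [pvB_loop, if_neg hc, if_pos hk3]
              rw [if_neg (not_not_intro hd)]
            rw [hstep, ih (k + 1) (by omega), hh, hdrop]
            simp [hd]
          · have hstep : pvB_loop k (c :: rest) = false := by
              simp only [pvB_loop, if_neg hc, if_pos hk3]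
              rw [if_pos hd]
            rw [hstep, hdrop]
            simp [List.isPrefixOf]
            intro h'
            exact absurd h'.symm hd

-- ===== VERDICT (by name: the statement is the Claim_ definition above) =====
theorem is_ldap_dns_py_spec : Claim_equal_is_ldap_dns_py := by
  intro dns _
  unfold Spec_is_ldap_dns_py is_ldap_dns_py is_ldap_dns_py_alt
  by_cases he : dns = ""
  · simp [he]
  · simp only [he, ne_eq, not_false_eq_true, if_true]
    rw [pvSplitOn_eq, pvA_loop_eq, pvB_loop_eq dns.toList 0 (by omega)]
    cases hh : pvSplit dns.toList with
    | nil => exact absurd hh (pvSplit_ne_nil dns.toList)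
    | cons h t => simp [List.headI]
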